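-- pv_equiv track=rewrite | github.com/Ersain/hackerrank | Solve Python/Sets/No Idea/NoIdea.py | count_happiness
-- ===== SOURCE A (Python) =====
-- def count_happiness(arr, set_1, set_2):
--     happiness = 0
--     for i in arr:
--         if i in set_1:
--             happiness += 1
--         elif i in set_2:
--             happiness -= 1
--     return happiness
-- ===== SOURCE B (Python) =====
-- def count_happiness(arr, set_1, set_2):
--     cnt = {}
--     for v in arr:
--         cnt[v] = cnt.get(v, 0) + 1
--     s1 = set(set_1)
--     s2 = set(set_2)
--     plus = sum(c for v, c in cnt.items() if v in s1)
--     minus = sum(c for v, c in cnt.items() if v not in s1 and v in s2)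
--     return plus - minus
-- ===== Notes on version B (the rewrite author's own statement) =====
-- stated objective: alternative
-- what changed: B builds a frequency table of arr once and iterates over the distinct values, returning the difference of the two weighted sums (counts of values in set_1 minus counts of values in set_2 but not set_1), instead of A's per-element accumulator loop.
import Mathlib
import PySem

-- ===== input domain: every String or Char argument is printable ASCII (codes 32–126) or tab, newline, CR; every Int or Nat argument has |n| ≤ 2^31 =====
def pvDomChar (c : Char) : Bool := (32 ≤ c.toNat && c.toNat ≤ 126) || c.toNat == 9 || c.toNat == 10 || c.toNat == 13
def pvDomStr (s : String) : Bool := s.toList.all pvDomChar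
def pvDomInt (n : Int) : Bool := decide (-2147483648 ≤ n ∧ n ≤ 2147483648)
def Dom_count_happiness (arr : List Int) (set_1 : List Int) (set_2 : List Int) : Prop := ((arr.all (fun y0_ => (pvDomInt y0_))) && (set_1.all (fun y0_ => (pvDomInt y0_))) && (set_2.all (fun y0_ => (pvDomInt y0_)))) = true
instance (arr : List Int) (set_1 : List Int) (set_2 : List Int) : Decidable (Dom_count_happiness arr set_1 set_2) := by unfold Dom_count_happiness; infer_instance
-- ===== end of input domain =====

-- B builds a frequency table of arr once and iterates over the distinct values,
-- returning the difference of the two weighted sums, instead of A's per-element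
-- accumulator loop (objective: alternative algorithm / data structure).

-- ===== PORT A =====
def count_happiness (arr : List Int) (set_1 : List Int) (set_2 : List Int) : Int :=
  arr.foldl (fun happiness i =>
    if i ∈ set_1 then happiness + 1
    else if i ∈ set_2 then happiness - 1
    else happiness) 0

-- ===== PORT B =====
def count_happiness_alt (arr : List Int) (set_1 : List Int) (set_2 : List Int) : Int :=
  let cnt : PySem.Dict Int Int :=
    arr.foldl (fun d v => d.insert v (d.getD v 0 + 1)) PySem.Dict.empty
  let s1 : PySem.Set Int := PySem.Set.ofList set_1
  let s2 : PySem.Set Int := PySem.Set.ofList set_2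
  let plus := ((cnt.items.filter (fun p => decide (p.1 ∈ s1))).map (·.2)).sum
  let minus := ((cnt.items.filter (fun p => !decide (p.1 ∈ s1) && decide (p.1 ∈ s2))).map (·.2)).sum
  plus - minus

-- ===== PRECONDITION & SPEC =====
def Spec_count_happiness (arr : List Int) (set_1 : List Int) (set_2 : List Int) (out : Int) : Prop := out = count_happiness_alt arr set_1 set_2
instance (arr : List Int) (set_1 : List Int) (set_2 : List Int) (out : Int) : Decidable (Spec_count_happiness arr set_1 set_2 out) := by unfold Spec_count_happiness; infer_instance

-- ===== CLAIM (what is proved, stated in full; the proofs are below) =====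
def Claim_equal_count_happiness : Prop := ∀ (arr : List Int) (set_1 : List Int) (set_2 : List Int), Dom_count_happiness arr set_1 set_2 → Spec_count_happiness arr set_1 set_2 (count_happiness arr set_1 set_2)

-- ===== LEMMAS AND PROOFS =====

-- A's loop computes (#elements in set_1) - (#elements in set_2 but not set_1).
theorem countA_loop (set_1 set_2 : List Int) :
    ∀ (arr : List Int) (acc : Int),
      arr.foldl (fun happiness i =>
        if i ∈ set_1 then happiness + 1
        else if i ∈ set_2 then happiness - 1
        else happiness) acc
      = acc + (arr.countP (fun i => decide (i ∈ set_1)) : Int)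
            - (arr.countP (fun i => !decide (i ∈ set_1) && decide (i ∈ set_2)) : Int) := by
  intro arr
  induction arr with
  | nil => intro acc; simp
  | cons a l ih =>
    intro acc
    simp only [List.foldl_cons, List.countP_cons, ih]
    by_cases h1 : a ∈ set_1 <;> by_cases h2 : a ∈ set_2 <;>
      simp [h1, h2] <;> omega

-- Summing counts of arr over a filtered list of arr's distinct values is a countP of arr.
theorem sum_counts_filter (arr : List Int) (q : Int → Bool) :
    (((PySem.Set.ofList arr).filter q).map (fun k => (arr.count k : Int))).sum
      = (arr.countP q : Int) := by
  have hperm : List.Perm (PySem.Set.ofList arr) arr.dedup := by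
    rw [List.perm_ext_iff_of_nodup (PySem.Set.nodup_ofList arr) arr.nodup_dedup]
    intro a
    rw [PySem.Set.mem_ofList, List.mem_dedup]
  calc (((PySem.Set.ofList arr).filter q).map (fun k => (arr.count k : Int))).sum
      = ((arr.dedup.filter q).map (fun k => (arr.count k : Int))).sum :=
        ((hperm.filter q).map _).sum_eq
    _ = (arr.countP q : Int) := by
        rw [show (fun k => ((arr.count k : ℕ) : Int)) =
              (fun n : ℕ => (n : Int)) ∘ (fun k => arr.count k) from rfl,
            ← List.map_map, ← Nat.cast_list_sum,
            List.sum_map_count_dedup_filter_eq_countP]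

theorem alt_eq (arr set_1 set_2 : List Int) :
    count_happiness_alt arr set_1 set_2
      = (arr.countP (fun i => decide (i ∈ set_1)) : Int)
        - (arr.countP (fun i => !decide (i ∈ set_1) && decide (i ∈ set_2)) : Int) := by
  unfold count_happiness_alt
  simp only [PySem.Dict.foldl_insert_getD_add_one_eq_counter, PySem.Dict.items_counter,
    List.filter_map, List.map_map, Function.comp_def, PySem.Set.mem_ofList]
  rw [sum_counts_filter arr (fun i => decide (i ∈ set_1)),
      sum_counts_filter arr (fun i => !decide (i ∈ set_1) && decide (i ∈ set_2))]

-- ===== VERDICT (by name: the statement is the Claim_ definition above) =====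
theorem count_happiness_spec : Claim_equal_count_happiness := by
  intro arr set_1 set_2 _
  unfold Spec_count_happiness count_happiness
  rw [countA_loop, alt_eq]
  ring
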